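-- pv_equiv track=rewrite | github.com/karma9874/Seq2Seq-Chatbot | cornell_Data_Utils.py | data_shorting
-- ===== SOURCE A (Python) =====
-- def data_shorting(max_length,min_length,clean_questions,clean_answers):
--     short_questions_temp = []
--     short_answers_temp = []
--     shorted_q = []
--     shorted_a = []
--
--     i = 0
--     for question in clean_questions:
--         if len(question.split()) >= min_length and len(question.split()) <= max_length:
--             short_questions_temp.append(question)
--             short_answers_temp.append(clean_answers[i])
--         i += 1
--
--     i=0
--     for answer in short_answers_temp:
--         if len(answer.split()) >= min_length and len(answer.split()) <= max_length:
--             shorted_a.append(answer)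
--             shorted_q.append(short_questions_temp[i])
--         i +=1
--
--     return shorted_q,shorted_a
-- ===== SOURCE B (Python) =====
-- def data_shorting(max_length, min_length, clean_questions, clean_answers):
--     shorted_q = []
--     shorted_a = []
--     for i in range(len(clean_questions)):
--         question = clean_questions[i]
--         if min_length <= len(question.split()) <= max_length:
--             answer = clean_answers[i]
--             if min_length <= len(answer.split()) <= max_length:
--                 shorted_q.append(question)
--                 shorted_a.append(answer)
--     return shorted_q, shorted_a
-- ===== Notes on version B (the rewrite author's own statement) =====
-- stated objective: simpler
-- what changed: Replaces A's two sequential filter passes with their two intermediate buffer lists by a single index-based pass that checks the question and answer length bounds together and appends directly to the output lists (indexing the answer only after the question passes, so the IndexError behaviour on short answer lists is unchanged).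
-- outside the precondition, e.g. on data_shorting(5, 1, ['hi there'], []): A raises IndexError, B raises IndexError
import Mathlib
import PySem

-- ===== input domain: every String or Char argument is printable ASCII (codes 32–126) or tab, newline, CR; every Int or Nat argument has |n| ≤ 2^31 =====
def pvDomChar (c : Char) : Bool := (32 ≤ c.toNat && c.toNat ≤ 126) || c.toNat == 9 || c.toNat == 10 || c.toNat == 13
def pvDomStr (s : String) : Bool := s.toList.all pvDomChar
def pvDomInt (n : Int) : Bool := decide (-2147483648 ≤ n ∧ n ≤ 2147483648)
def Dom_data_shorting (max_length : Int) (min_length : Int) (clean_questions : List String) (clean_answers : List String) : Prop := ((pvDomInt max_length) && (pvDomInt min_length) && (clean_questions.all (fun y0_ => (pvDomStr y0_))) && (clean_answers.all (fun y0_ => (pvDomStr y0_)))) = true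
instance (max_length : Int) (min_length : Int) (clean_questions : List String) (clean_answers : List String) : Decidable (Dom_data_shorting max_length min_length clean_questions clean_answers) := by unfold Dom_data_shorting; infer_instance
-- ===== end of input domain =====

-- ===== PORT A =====
-- B replaces A's two filter passes and intermediate buffers by one combined index pass; objective: simpler.
-- word count of s: len(s.split())
def dsWC (s : String) : Int := ((PySem.Str.split₀ s).length : Int)

-- first loop of A: filter questions, pairing each passing question with clean_answers[i]
-- (pyGetD is exact here under Pre_data_shorting, which puts every accessed index in range)
def dsLoop1 (max_length min_length : Int) (clean_answers : List String) :
    List String → List String × List String × Int → List String × List String × Int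
  | [], st => st
  | q :: rest, (tq, ta, i) =>
      if dsWC q ≥ min_length ∧ dsWC q ≤ max_length then
        dsLoop1 max_length min_length clean_answers rest
          (tq ++ [q], ta ++ [PySem.List.pyGetD clean_answers i ""], i + 1)
      else
        dsLoop1 max_length min_length clean_answers rest (tq, ta, i + 1)

-- second loop of A: filter the buffered answers, indexing the buffered questions
-- (the index is always in range here: both buffers have equal length)
def dsLoop2 (max_length min_length : Int) (short_questions_temp : List String) :
    List String → List String × List String × Int → List String × List String × Int
  | [], st => st
  | a :: rest, (sq, sa, i) =>
      if dsWC a ≥ min_length ∧ dsWC a ≤ max_length then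
        dsLoop2 max_length min_length short_questions_temp rest
          (sq ++ [PySem.List.pyGetD short_questions_temp i ""], sa ++ [a], i + 1)
      else
        dsLoop2 max_length min_length short_questions_temp rest (sq, sa, i + 1)

def data_shorting (max_length : Int) (min_length : Int) (clean_questions : List String) (clean_answers : List String) : List String × List String :=
  let r1 := dsLoop1 max_length min_length clean_answers clean_questions ([], [], 0)
  let r2 := dsLoop2 max_length min_length r1.1 r1.2.1 ([], [], 0)
  (r2.1, r2.2.1)

-- ===== PORT B =====
-- single pass over the questions carrying the running index i (B's `for i in range(len(...))`)
def dsGo (max_length min_length : Int) (clean_answers : List String) :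
    Int → List String → List String × List String
  | _, [] => ([], [])
  | i, q :: rest =>
      if min_length ≤ dsWC q ∧ dsWC q ≤ max_length then
        let a := PySem.List.pyGetD clean_answers i ""
        if min_length ≤ dsWC a ∧ dsWC a ≤ max_length then
          let r := dsGo max_length min_length clean_answers (i + 1) rest
          (q :: r.1, a :: r.2)
        else dsGo max_length min_length clean_answers (i + 1) rest
      else dsGo max_length min_length clean_answers (i + 1) rest

def data_shorting_alt (max_length : Int) (min_length : Int) (clean_questions : List String) (clean_answers : List String) : List String × List String :=
  dsGo max_length min_length clean_answers 0 clean_questions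

-- ===== PRECONDITION & SPEC =====
-- Pre_ excludes exactly the inputs on which Python A raises IndexError: a question whose
-- word count passes the bounds sitting at an index with no corresponding answer.
def Pre_data_shorting (max_length : Int) (min_length : Int) (clean_questions : List String) (clean_answers : List String) : Prop :=
  ∀ i, i < clean_questions.length →
    (min_length ≤ dsWC (clean_questions.getD i "") ∧ dsWC (clean_questions.getD i "") ≤ max_length) →
    i < clean_answers.length
instance (max_length : Int) (min_length : Int) (clean_questions : List String) (clean_answers : List String) : Decidable (Pre_data_shorting max_length min_length clean_questions clean_answers) := by unfold Pre_data_shorting; infer_instance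

def pvWitness_data_shorting : Int × Int × List String × List String :=
  (5, 1, ["hi there", "a b c d e f"], ["yo"])

def Spec_data_shorting (max_length : Int) (min_length : Int) (clean_questions : List String) (clean_answers : List String) (out : List String × List String) : Prop := out = data_shorting_alt max_length min_length clean_questions clean_answers
instance (max_length : Int) (min_length : Int) (clean_questions : List String) (clean_answers : List String) (out : List String × List String) : Decidable (Spec_data_shorting max_length min_length clean_questions clean_answers out) := by unfold Spec_data_shorting; infer_instance

-- ===== CLAIM (what is proved, stated in full; the proofs are below) =====
def Claim_equal_data_shorting : Prop := ∀ (max_length : Int) (min_length : Int) (clean_questions : List String) (clean_answers : List String), Dom_data_shorting max_length min_length clean_questions clean_answers → Pre_data_shorting max_length min_length clean_questions clean_answers → Spec_data_shorting max_length min_length clean_questions clean_answers (data_shorting max_length min_length clean_questions clean_answers)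

-- ===== LEMMAS AND PROOFS =====

-- the list of (passing question, paired answer) pairs produced by A's first loop, functionally
def dsSel (max_length min_length : Int) (clean_answers : List String) :
    Int → List String → List (String × String)
  | _, [] => []
  | i, q :: rest =>
      if dsWC q ≥ min_length ∧ dsWC q ≤ max_length then
        (q, PySem.List.pyGetD clean_answers i "") :: dsSel max_length min_length clean_answers (i + 1) rest
      else dsSel max_length min_length clean_answers (i + 1) rest

theorem dsLoop1_eq (mx mn : Int) (ans : List String) :
    ∀ (qs tq ta : List String) (i : Int),
      dsLoop1 mx mn ans qs (tq, ta, i) =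
        (tq ++ (dsSel mx mn ans i qs).map Prod.fst,
         ta ++ (dsSel mx mn ans i qs).map Prod.snd,
         i + qs.length) := by
  intro qs
  induction qs with
  | nil => intro tq ta i; simp [dsLoop1, dsSel]
  | cons q rest ih =>
      intro tq ta i
      simp only [dsLoop1, dsSel]
      split_ifs with h
      · rw [ih]; simp; omega
      · rw [ih]; simp; omega

theorem dsLoop2_eq (mx mn : Int) :
    ∀ (l pre : List (String × String)) (sq sa : List String),
      dsLoop2 mx mn ((pre ++ l).map Prod.fst) (l.map Prod.snd) (sq, sa, (pre.length : Int)) =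
        (sq ++ ((l.filter (fun p => decide (dsWC p.2 ≥ mn ∧ dsWC p.2 ≤ mx))).map Prod.fst),
         sa ++ ((l.filter (fun p => decide (dsWC p.2 ≥ mn ∧ dsWC p.2 ≤ mx))).map Prod.snd),
         (pre.length : Int) + l.length) := by
  intro l
  induction l with
  | nil => intro pre sq sa; simp [dsLoop2]
  | cons p rest ih =>
      intro pre sq sa
      simp only [List.map_cons, dsLoop2]
      have hget : PySem.List.pyGetD ((pre ++ p :: rest).map Prod.fst) (pre.length : Int) "" = p.1 := by
        rw [show ((pre.length : Int)) = ((pre.map Prod.fst).length : Int) by simp,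
            show (pre ++ p :: rest).map Prod.fst = pre.map Prod.fst ++ p.1 :: rest.map Prod.fst by simp]
        simp [PySem.List.pyGetD_natCast, List.getD]
      split_ifs with h
      · rw [hget]
        have := ih (pre ++ [p]) (sq ++ [p.1]) (sa ++ [p.2])
        simp only [List.append_assoc, List.cons_append, List.nil_append, List.length_append,
          List.length_cons, List.length_nil] at this ⊢
        rw [show ((pre.length : Int)) + 1 = (((pre.length + 1 : Nat)) : Int) by push_cast; ring] at *
        rw [this]
        simp [h]
        omega
      · have := ih (pre ++ [p]) sq sa
        simp only [List.append_assoc, List.cons_append, List.nil_append, List.length_append,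
          List.length_cons, List.length_nil] at this ⊢
        rw [show ((pre.length : Int)) + 1 = (((pre.length + 1 : Nat)) : Int) by push_cast; ring] at *
        rw [this]
        simp [h]
        omega

theorem dsGo_eq (mx mn : Int) (ans : List String) :
    ∀ (qs : List String) (i : Int),
      dsGo mx mn ans i qs =
        (((dsSel mx mn ans i qs).filter (fun p => decide (dsWC p.2 ≥ mn ∧ dsWC p.2 ≤ mx))).map Prod.fst,
         ((dsSel mx mn ans i qs).filter (fun p => decide (dsWC p.2 ≥ mn ∧ dsWC p.2 ≤ mx))).map Prod.snd) := by
  intro qs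
  induction qs with
  | nil => intro i; simp [dsGo, dsSel]
  | cons q rest ih =>
      intro i
      simp only [dsGo, dsSel]
      by_cases hq : dsWC q ≥ mn ∧ dsWC q ≤ mx
      · rw [if_pos (by exact ⟨hq.1, hq.2⟩), if_pos hq]
        by_cases ha : mn ≤ dsWC (PySem.List.pyGetD ans i "") ∧ dsWC (PySem.List.pyGetD ans i "") ≤ mx
        · rw [if_pos ha]
          simp [ha.1, ha.2, ih (i + 1)]
        · rw [if_neg ha]
          rw [List.filter_cons, if_neg (by simpa using fun h1 h2 => ha ⟨h1, h2⟩)]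
          exact ih (i + 1)
      · rw [if_neg (fun h => hq ⟨h.1, h.2⟩), if_neg hq]
        exact ih (i + 1)

-- ===== VERDICT (by name: the statement is the Claim_ definition above) =====
theorem data_shorting_spec : Claim_equal_data_shorting := by
  intro mx mn qs ans _ _
  unfold Spec_data_shorting data_shorting data_shorting_alt
  have h2 := dsLoop2_eq mx mn (dsSel mx mn ans 0 qs) [] [] []
  simp only [List.nil_append, List.length_nil, Nat.cast_zero] at h2
  simp [dsLoop1_eq, dsGo_eq, h2]
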